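-- pv_equiv track=rewrite | github.com/jakehf90s/GCloudUI | utils.py | format_permission_members
-- ===== SOURCE A (Python) =====
-- from typing import Dict, List, Any, Optional, Tuple
--
-- def format_permission_members(members: List[str]) -> str:
--     """Format IAM members for display"""
--     if not members:
--         return "None"
--
--     # Group by type
--     user_members = [m for m in members if m.startswith('user:')]
--     service_accounts = [m for m in members if m.startswith('serviceAccount:')]
--     groups = [m for m in members if m.startswith('group:')]
--     domains = [m for m in members if m.startswith('domain:')]
--
--     formatted = []
--     if user_members:
--         formatted.append(f"Users: {len(user_members)}")
--     if service_accounts: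
--         formatted.append(f"Service Accounts: {len(service_accounts)}")
--     if groups:
--         formatted.append(f"Groups: {len(groups)}")
--     if domains:
--         formatted.append(f"Domains: {len(domains)}")
--
--     return ", ".join(formatted) if formatted else "None"
-- ===== SOURCE B (Python) =====
-- def format_permission_members(members):
--     """Format IAM members for display (one counting pass, then one format pass)."""
--     users = sas = groups = domains = 0
--     for m in members:
--         if m.startswith('user:'):
--             users += 1
--         elif m.startswith('serviceAccount:'):
--             sas += 1
--         elif m.startswith('group:'):
--             groups += 1
--         elif m.startswith('domain:'):
--             domains += 1
--     parts = []
--     for count, label in ((users, 'Users: '), (sas, 'Service Accounts: '),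
--                          (groups, 'Groups: '), (domains, 'Domains: ')):
--         if count:
--             parts.append(label + str(count))
--     return ', '.join(parts) if parts else 'None'
-- ===== Notes on version B (the rewrite author's own statement) =====
-- stated objective: alternative
-- what changed: replaces four separate filter passes building intermediate member lists with a single counting pass (if/elif on the first matching prefix) followed by one ordered formatting pass over fixed (count,label) pairs
import Mathlib
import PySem

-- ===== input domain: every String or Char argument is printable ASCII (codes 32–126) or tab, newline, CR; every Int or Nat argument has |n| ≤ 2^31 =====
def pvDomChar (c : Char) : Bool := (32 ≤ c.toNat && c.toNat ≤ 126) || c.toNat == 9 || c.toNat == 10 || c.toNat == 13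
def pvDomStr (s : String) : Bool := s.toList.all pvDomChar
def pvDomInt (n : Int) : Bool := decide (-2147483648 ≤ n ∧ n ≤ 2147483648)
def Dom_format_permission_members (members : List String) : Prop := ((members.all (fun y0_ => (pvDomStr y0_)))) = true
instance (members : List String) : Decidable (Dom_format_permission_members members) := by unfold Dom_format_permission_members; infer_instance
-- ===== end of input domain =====

-- B replaces A's four filter passes by one counting pass (if/elif) plus one format pass; alternative decomposition.

-- ===== PORT A =====
def format_permission_members (members : List String) : String :=
  if members = [] then "None"
  else
    let user_members := members.filter (fun m => PySem.Str.startswith m "user:")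
    let service_accounts := members.filter (fun m => PySem.Str.startswith m "serviceAccount:")
    let groups := members.filter (fun m => PySem.Str.startswith m "group:")
    let domains := members.filter (fun m => PySem.Str.startswith m "domain:")
    let formatted : List String := []
    let formatted := if user_members ≠ [] then formatted ++ ["Users: " ++ PySem.Int.toStr (user_members.length : Int)] else formatted
    let formatted := if service_accounts ≠ [] then formatted ++ ["Service Accounts: " ++ PySem.Int.toStr (service_accounts.length : Int)] else formatted
    let formatted := if groups ≠ [] then formatted ++ ["Groups: " ++ PySem.Int.toStr (groups.length : Int)] else formatted
    let formatted := if domains ≠ [] then formatted ++ ["Domains: " ++ PySem.Int.toStr (domains.length : Int)] else formatted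
    if formatted ≠ [] then PySem.Str.join ", " formatted else "None"

-- ===== PORT B =====
-- the if/elif chain of B's counting loop
def pvCountStep (c : Int × Int × Int × Int) (m : String) : Int × Int × Int × Int :=
  if PySem.Str.startswith m "user:" then (c.1 + 1, c.2.1, c.2.2.1, c.2.2.2)
  else if PySem.Str.startswith m "serviceAccount:" then (c.1, c.2.1 + 1, c.2.2.1, c.2.2.2)
  else if PySem.Str.startswith m "group:" then (c.1, c.2.1, c.2.2.1 + 1, c.2.2.2)
  else if PySem.Str.startswith m "domain:" then (c.1, c.2.1, c.2.2.1, c.2.2.2 + 1)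
  else c

def format_permission_members_alt (members : List String) : String :=
  let c := members.foldl pvCountStep (0, 0, 0, 0)
  let parts := [(c.1, "Users: "), (c.2.1, "Service Accounts: "),
                (c.2.2.1, "Groups: "), (c.2.2.2, "Domains: ")].foldl
      (fun acc p => if p.1 ≠ 0 then acc ++ [p.2 ++ PySem.Int.toStr p.1] else acc) []
  if parts ≠ [] then PySem.Str.join ", " parts else "None"

-- ===== PRECONDITION & SPEC =====
def Spec_format_permission_members (members : List String) (out : String) : Prop := out = format_permission_members_alt members
instance (members : List String) (out : String) : Decidable (Spec_format_permission_members members out) := by unfold Spec_format_permission_members; infer_instance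

-- ===== CLAIM (what is proved, stated in full; the proofs are below) =====
def Claim_equal_format_permission_members : Prop := ∀ (members : List String), Dom_format_permission_members members → Spec_format_permission_members members (format_permission_members members)

-- ===== LEMMAS AND PROOFS =====

-- two nonempty prefixes with different first characters cannot both be prefixes of the same list
lemma pv_excl {l : List Char} {a b : Char} {p q : List Char} (hab : a ≠ b)
    (h : PySem.Chars.startswith l (a :: p) = true) : PySem.Chars.startswith l (b :: q) = false := by
  rw [Bool.eq_false_iff]
  intro h2
  rw [PySem.Chars.startswith_iff] at h h2
  obtain ⟨t, ht⟩ := h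
  obtain ⟨t', ht'⟩ := h2
  rw [← ht'] at ht
  simp only [List.cons_append, List.cons.injEq] at ht
  exact hab ht.1

lemma pv_sw_excl (m : String) {a b : Char} (p q : String)
    (hab : a ≠ b) (hp : p.toList = a :: (p.toList.tail)) (hq : q.toList = b :: (q.toList.tail))
    (h : PySem.Str.startswith m p = true) : PySem.Str.startswith m q = false := by
  simp only [PySem.Str.startswith_eq] at h ⊢
  rw [hq]
  rw [hp] at h
  exact pv_excl hab h

-- counting invariant: the fold computes the four filter lengths
lemma pv_counts (l : List String) (u s g d : Int) :
    l.foldl pvCountStep (u, s, g, d) =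
      (u + ((l.filter fun m => PySem.Str.startswith m "user:").length : Int),
       s + ((l.filter fun m => PySem.Str.startswith m "serviceAccount:").length : Int),
       g + ((l.filter fun m => PySem.Str.startswith m "group:").length : Int),
       d + ((l.filter fun m => PySem.Str.startswith m "domain:").length : Int)) := by
  induction l generalizing u s g d with
  | nil => simp
  | cons m t ih =>
    simp only [List.foldl_cons, List.filter_cons, pvCountStep]
    by_cases hu : PySem.Str.startswith m "user:" = true
    · have hs := pv_sw_excl m "user:" "serviceAccount:" (show 'u' ≠ 's' by decide) (by decide) (by decide) hu
      have hg := pv_sw_excl m "user:" "group:" (show 'u' ≠ 'g' by decide) (by decide) (by decide) hu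
      have hd := pv_sw_excl m "user:" "domain:" (show 'u' ≠ 'd' by decide) (by decide) (by decide) hu
      simp only [hu, hs, hg, hd, if_true, Bool.false_eq_true, if_false, ih, List.length_cons]
      rw [Prod.mk.injEq, Prod.mk.injEq, Prod.mk.injEq]
      push_cast; omega
    · rw [Bool.not_eq_true] at hu
      by_cases hs : PySem.Str.startswith m "serviceAccount:" = true
      · have hg := pv_sw_excl m "serviceAccount:" "group:" (show 's' ≠ 'g' by decide) (by decide) (by decide) hs
        have hd := pv_sw_excl m "serviceAccount:" "domain:" (show 's' ≠ 'd' by decide) (by decide) (by decide) hs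
        simp only [hu, hs, hg, hd, if_true, Bool.false_eq_true, if_false, ih, List.length_cons]
        rw [Prod.mk.injEq, Prod.mk.injEq, Prod.mk.injEq]
        push_cast; omega
      · rw [Bool.not_eq_true] at hs
        by_cases hg : PySem.Str.startswith m "group:" = true
        · have hd := pv_sw_excl m "group:" "domain:" (show 'g' ≠ 'd' by decide) (by decide) (by decide) hg
          simp only [hu, hs, hg, hd, if_true, Bool.false_eq_true, if_false, ih, List.length_cons]
          rw [Prod.mk.injEq, Prod.mk.injEq, Prod.mk.injEq]
          push_cast; omega
        · rw [Bool.not_eq_true] at hg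
          by_cases hd : PySem.Str.startswith m "domain:" = true
          · simp only [hu, hs, hg, hd, if_true, Bool.false_eq_true, if_false, ih, List.length_cons]
            rw [Prod.mk.injEq, Prod.mk.injEq, Prod.mk.injEq]
            push_cast; omega
          · rw [Bool.not_eq_true] at hd
            simp only [hu, hs, hg, hd, Bool.false_eq_true, if_false, ih]

-- ===== VERDICT (by name: the statement is the Claim_ definition above) =====
theorem format_permission_members_spec : Claim_equal_format_permission_members := by
  intro members _
  unfold Spec_format_permission_members format_permission_members format_permission_members_alt
  by_cases hm : members = []
  · subst hm; decide
  · rw [pv_counts]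
    simp only [if_neg hm, zero_add, List.foldl_cons, List.foldl_nil, ne_eq, Nat.cast_eq_zero,
      List.length_eq_zero_iff, List.nil_append]
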